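-- pv_equiv track=rewrite | github.com/KateKolyadko/AOIS | lab3/SKDNF.py | get_combinations
-- ===== SOURCE A (Python) =====
-- def get_combinations(lst, start_index, end_index):
--     combinations = [[]]
--     for item in lst[start_index:end_index]:
--         if item.startswith('!'):
--             combinations = [combo + [item[1:]] for combo in combinations] + [combo + ['!' + item[1:]] for combo in
--                                                                              combinations]
--         else:
--             combinations = [combo + [item] for combo in combinations] + [combo + ['!' + item] for combo in
--                                                                          combinations]
--     return combinations
-- ===== SOURCE B (Python) =====
-- def get_combinations(lst, start_index, end_index):
--     names = [w[1:] if w.startswith('!') else w for w in lst[start_index:end_index]]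
--     return [['!' + v if (i >> j) & 1 else v for j, v in enumerate(names)]
--             for i in range(1 << len(names))]
-- ===== Notes on version B (the rewrite author's own statement) =====
-- stated objective: alternative
-- what changed: Replaces the progressive list-doubling fold with a direct enumeration: normalize the slice to bare variable names once, then build row i of the 2^n results by reading bit j of i to decide whether variable j is negated.
import Mathlib
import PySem

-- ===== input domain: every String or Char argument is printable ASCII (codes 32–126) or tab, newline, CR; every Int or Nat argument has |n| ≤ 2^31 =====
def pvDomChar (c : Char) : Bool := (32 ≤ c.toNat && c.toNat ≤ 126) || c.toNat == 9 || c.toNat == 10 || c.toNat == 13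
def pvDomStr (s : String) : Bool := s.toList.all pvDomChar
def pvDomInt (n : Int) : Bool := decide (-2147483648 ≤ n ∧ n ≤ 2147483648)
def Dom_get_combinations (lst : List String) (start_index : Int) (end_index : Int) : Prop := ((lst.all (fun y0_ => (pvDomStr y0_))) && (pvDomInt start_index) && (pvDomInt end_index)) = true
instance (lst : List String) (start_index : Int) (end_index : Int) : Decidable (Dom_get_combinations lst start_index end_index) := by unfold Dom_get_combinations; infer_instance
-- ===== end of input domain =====

-- B replaces A's progressive list-doubling fold by direct enumeration: normalize the slice
-- to bare variable names once, then build row i by reading bit j of i (1 = negated variable j).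
-- Same cost class; the rewrite is structural ('alternative'), not claimed faster.

-- ===== PORT A =====
def get_combinations (lst : List String) (start_index : Int) (end_index : Int) : List (List String) :=
  (PySem.List.slice lst (some start_index) (some end_index)).foldl
    (fun combinations item =>
      if PySem.Str.startswith item "!" then
        combinations.map (fun combo => combo ++ [PySem.Str.slice item (some 1) none]) ++
        combinations.map (fun combo => combo ++ ["!" ++ PySem.Str.slice item (some 1) none])
      else
        combinations.map (fun combo => combo ++ [item]) ++
        combinations.map (fun combo => combo ++ ["!" ++ item]))
    [[]]

-- ===== PORT B =====
-- Source B's '(i >> j) & 1' on the nonnegative loop index i is read bit-for-bit as Nat.testBit i j.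
def get_combinations_alt (lst : List String) (start_index : Int) (end_index : Int) : List (List String) :=
  let vars := (PySem.List.slice lst (some start_index) (some end_index)).map
    (fun w => if PySem.Str.startswith w "!" then PySem.Str.slice w (some 1) none else w)
  (List.range (2 ^ vars.length)).map (fun i =>
    vars.zipIdx.map (fun p => if i.testBit p.2 then "!" ++ p.1 else p.1))

-- ===== PRECONDITION & SPEC =====
def Spec_get_combinations (lst : List String) (start_index : Int) (end_index : Int) (out : List (List String)) : Prop := out = get_combinations_alt lst start_index end_index
instance (lst : List String) (start_index : Int) (end_index : Int) (out : List (List String)) : Decidable (Spec_get_combinations lst start_index end_index out) := by unfold Spec_get_combinations; infer_instance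

-- ===== CLAIM (what is proved, stated in full; the proofs are below) =====
def Claim_equal_get_combinations : Prop := ∀ (lst : List String) (start_index : Int) (end_index : Int), Dom_get_combinations lst start_index end_index → Spec_get_combinations lst start_index end_index (get_combinations lst start_index end_index)

-- ===== LEMMAS AND PROOFS =====

-- A's loop body, applied to the already-normalized variable name.
def pvStep (acc : List (List String)) (v : String) : List (List String) :=
  acc.map (fun combo => combo ++ [v]) ++ acc.map (fun combo => combo ++ ["!" ++ v])

-- B's enumeration over an arbitrary variable list.
def pvEnum (vs : List String) : List (List String) :=
  (List.range (2 ^ vs.length)).map (fun i =>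
    vs.zipIdx.map (fun p => if i.testBit p.2 then "!" ++ p.1 else p.1))

def pvNorm (w : String) : String :=
  if PySem.Str.startswith w "!" then PySem.Str.slice w (some 1) none else w

lemma pvEnum_snoc (vs : List String) (v : String) :
    pvEnum (vs ++ [v]) = pvStep (pvEnum vs) v := by
  unfold pvEnum pvStep
  have hlen : (vs ++ [v]).length = vs.length + 1 := by simp
  rw [hlen, pow_succ, mul_two, List.range_add, List.map_append]
  congr 1
  · -- low half: bit (vs.length) is 0, so the new variable is positive
    rw [List.map_map]
    apply List.map_congr_left
    intro i hi
    have hi' : i < 2 ^ vs.length := List.mem_range.mp hi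
    simp only [Function.comp_apply, List.zipIdx_append, List.map_append]
    congr 1
    simp [List.zipIdx, Nat.testBit_lt_two_pow hi']
  · -- high half: 2^n + i has bit n set and lower bits those of i
    rw [List.map_map, List.map_map]
    apply List.map_congr_left
    intro i hi
    have hi' : i < 2 ^ vs.length := List.mem_range.mp hi
    simp only [Function.comp_apply, List.zipIdx_append, List.map_append]
    congr 1
    · apply List.map_congr_left
      rw [List.forall_mem_zipIdx']
      intro j hj
      rw [Nat.testBit_two_pow_add_gt hj]
    · simp [List.zipIdx, Nat.testBit_two_pow_add_eq, Nat.testBit_lt_two_pow hi']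

lemma pvFold_eq_pvEnum (vs : List String) :
    vs.foldl pvStep [[]] = pvEnum vs := by
  induction vs using List.reverseRecOn with
  | nil => rfl
  | append_singleton vs v ih =>
    rw [List.foldl_append, List.foldl_cons, List.foldl_nil, ih, pvEnum_snoc]

lemma pvA_eq_fold (lst : List String) (s e : Int) :
    get_combinations lst s e =
      ((PySem.List.slice lst (some s) (some e)).map pvNorm).foldl pvStep [[]] := by
  unfold get_combinations
  rw [List.foldl_map]
  have hfun : (fun (acc : List (List String)) (w : String) => pvStep acc (pvNorm w)) =
      fun combinations item =>
        if PySem.Str.startswith item "!" then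
          combinations.map (fun combo => combo ++ [PySem.Str.slice item (some 1) none]) ++
          combinations.map (fun combo => combo ++ ["!" ++ PySem.Str.slice item (some 1) none])
        else
          combinations.map (fun combo => combo ++ [item]) ++
          combinations.map (fun combo => combo ++ ["!" ++ item]) := by
    funext acc w
    unfold pvStep pvNorm
    by_cases h : PySem.Str.startswith w "!" = true
    · simp only [if_pos h]
    · simp only [if_neg h]
  rw [hfun]

-- ===== VERDICT (by name: the statement is the Claim_ definition above) =====
theorem get_combinations_spec : Claim_equal_get_combinations := by
  intro lst s e _
  unfold Spec_get_combinations get_combinations_alt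
  rw [pvA_eq_fold, pvFold_eq_pvEnum]
  rfl
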